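-- pv_equiv track=rewrite | github.com/flashlin/Samples | Tempermonkey-vue3-tfjs/torch/ml/bpe_utils.py | generate_bpe_vocabulary_and_merges
-- ===== SOURCE A (Python) =====
-- from collections import Counter
--
-- def generate_bpe_vocabulary_and_merges(tokens, num_merges=10):
--     # Initialize the vocabulary and the merges
--     vocabulary = {}
--     merges = []
--
--     # Create a counter for the tokens
--     token_counts = Counter(tokens)
--
--     # Initialize the current vocabulary size
--     vocabulary_size = 0
--
--     # Iterate over the tokens
--     for token, count in token_counts.items():
--         # If the token doesn't exist in the vocabulary, add it
--         if token not in vocabulary: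
--             vocabulary[token] = {
--                 'count': count,
--                 'idx': vocabulary_size
--             }
--             vocabulary_size += 1
--
--     merge_index = 0
--     for token, count in token_counts.items():
--         if count == 1:
--             continue
--
--         current_merge = [token]
--         for remaining_token in token_counts.keys():
--             # Skip the current token
--             if remaining_token == token:
--                 continue
--
--             # Check if the current merge ends with the remaining token
--             if current_merge[-1].endswith(remaining_token):
--                 current_merge.append(remaining_token)
--
--         # Check if the current merge has more than one element
--         if len(current_merge) > 1:
--             # Add the current merge to the list of merges
--             merges.append((current_merge[0], current_merge[1]))
--
--             # Increment the current merge index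
--             merge_index += 1
--
--             # Stop if the required number of merges has been reached
--             if merge_index >= num_merges:
--                 break
--
--     return vocabulary, merges
-- ===== SOURCE B (Python) =====
-- def generate_bpe_vocabulary_and_merges(tokens, num_merges=10):
--     # One pass to count tokens in first-occurrence order (plain dict).
--     counts = {}
--     for t in tokens:
--         counts[t] = counts.get(t, 0) + 1
--     # Insertion index of every distinct token.
--     order = {t: i for i, t in enumerate(counts)}
--     vocabulary = {t: {'count': c, 'idx': order[t]} for t, c in counts.items()}
--     merges = []
--     for t, c in counts.items():
--         if c == 1:
--             continue
--         # Earliest-inserted distinct token that is a suffix of t: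
--         # enumerate t's proper suffixes (incl. '') instead of scanning the vocab.
--         best = None
--         for i in range(1, len(t) + 1):
--             j = order.get(t[i:])
--             if j is not None and (best is None or j < best[0]):
--                 best = (j, t[i:])
--         if best is not None:
--             merges.append((t, best[1]))
--             if len(merges) >= num_merges:
--                 break
--     return vocabulary, merges
-- ===== Notes on version B (the rewrite author's own statement) =====
-- stated objective: faster
-- what changed: Instead of scanning the whole vocabulary for each repeated token (and mutating a growing chain list), B builds a token->insertion-index hash map once and, per repeated token, tests only the token's own suffixes against it, picking the earliest-inserted matching suffix; the vocabulary is built in one dict/map pass.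
import Mathlib
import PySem

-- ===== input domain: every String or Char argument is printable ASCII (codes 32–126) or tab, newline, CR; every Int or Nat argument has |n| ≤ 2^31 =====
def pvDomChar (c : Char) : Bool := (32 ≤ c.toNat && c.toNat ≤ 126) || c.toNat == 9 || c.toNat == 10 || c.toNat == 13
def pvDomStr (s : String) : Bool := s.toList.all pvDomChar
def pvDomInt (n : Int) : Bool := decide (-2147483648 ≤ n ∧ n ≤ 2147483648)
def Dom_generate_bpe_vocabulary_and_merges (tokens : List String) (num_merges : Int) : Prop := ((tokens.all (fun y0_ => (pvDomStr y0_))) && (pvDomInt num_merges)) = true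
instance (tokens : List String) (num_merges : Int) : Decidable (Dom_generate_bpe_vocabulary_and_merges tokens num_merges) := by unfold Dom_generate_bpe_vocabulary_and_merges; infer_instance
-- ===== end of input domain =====

-- B replaces A's inner scan over the whole vocabulary by a scan over the token's own suffixes
-- against a hash index (asymptotically fewer string comparisons); same return value.

-- ===== PORT A =====
-- inner loop 'for remaining_token in token_counts.keys(): …' of A
-- 'current_merge[-1]' is ported as getLast!: current_merge starts as [token] and only grows.
def pvScanStepA (token : String) (current_merge : List String) (remaining_token : String) : List String :=
  if remaining_token == token then current_merge
  else if PySem.Str.endswith (current_merge.getLast!) remaining_token then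
    current_merge ++ [remaining_token]
  else current_merge

def pvMergeScanA (token : String) (ks : List String) : List String :=
  ks.foldl (pvScanStepA token) [token]

-- the 'for token, count in token_counts.items(): …' loop with its break, as structural recursion
-- 'current_merge[0]' / 'current_merge[1]' are in range when length > 1, ported as pyGetD.
def pvMergeLoopA (token_counts : PySem.Dict String Int) (num_merges : Int) :
    List (String × Int) → Int → List (String × String) → List (String × String)
  | [], _, merges => merges
  | (token, count) :: rest, merge_index, merges =>
    if count == 1 then pvMergeLoopA token_counts num_merges rest merge_index merges
    else
      let current_merge := pvMergeScanA token token_counts.keys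
      if current_merge.length > 1 then
        let merges' := merges ++ [(PySem.List.pyGetD current_merge 0 "", PySem.List.pyGetD current_merge 1 "")]
        if merge_index + 1 ≥ num_merges then merges'
        else pvMergeLoopA token_counts num_merges rest (merge_index + 1) merges'
      else pvMergeLoopA token_counts num_merges rest merge_index merges

-- the Python dict literal {'count': …, 'idx': …} is returned as its items list (the output type)
def generate_bpe_vocabulary_and_merges (tokens : List String) (num_merges : Int) :
    (List (String × List (String × Int))) × (List (String × String)) :=
  let token_counts := PySem.Dict.counter tokens
  let st := token_counts.items.foldl
    (fun (st : PySem.Dict String (List (String × Int)) × Int) p =>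
      if st.1.contains p.1 then st
      else (st.1.insert p.1 [("count", p.2), ("idx", st.2)], st.2 + 1))
    (PySem.Dict.empty, 0)
  (st.1.items, pvMergeLoopA token_counts num_merges token_counts.items 0 [])

-- ===== PORT B =====
-- earliest-inserted vocabulary entry that is a proper suffix of t (Source B's inner range loop)
def pvBestSuffix (order : PySem.Dict String Int) (t : String) : Option (Int × String) :=
  (PySem.List.pyRange 1 (PySem.Str.len t + 1) 1).foldl
    (fun best i =>
      match PySem.Dict.get? order (PySem.Str.slice t (some i) none) with
      | none => best
      | some j => match best with
        | none => some (j, PySem.Str.slice t (some i) none)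
        | some b => if j < b.1 then some (j, PySem.Str.slice t (some i) none) else best)
    none

def pvMergeLoopB (order : PySem.Dict String Int) (num_merges : Int) :
    List (String × Int) → List (String × String) → List (String × String)
  | [], merges => merges
  | (t, c) :: rest, merges =>
    if c == 1 then pvMergeLoopB order num_merges rest merges
    else match pvBestSuffix order t with
      | none => pvMergeLoopB order num_merges rest merges
      | some b =>
        let merges' := merges ++ [(t, b.2)]
        if (merges'.length : Int) ≥ num_merges then merges'
        else pvMergeLoopB order num_merges rest merges'

-- 'order[t]' in Source B never misses (t is a key); ported as getD with an unused default
def generate_bpe_vocabulary_and_merges_alt (tokens : List String) (num_merges : Int) :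
    (List (String × List (String × Int))) × (List (String × String)) :=
  let counts := tokens.foldl (fun d t => d.insert t (d.getD t 0 + 1)) PySem.Dict.empty
  let order := (PySem.List.enumerate counts.keys 0).foldl
    (fun (d : PySem.Dict String Int) q => d.insert q.2 q.1) PySem.Dict.empty
  let vocabulary := counts.items.map
    (fun p => (p.1, [("count", p.2), ("idx", order.getD p.1 0)]))
  (vocabulary, pvMergeLoopB order num_merges counts.items [])

-- ===== PRECONDITION & SPEC =====
def Spec_generate_bpe_vocabulary_and_merges (tokens : List String) (num_merges : Int) (out : (List (String × List (String × Int))) × (List (String × String))) : Prop := out = generate_bpe_vocabulary_and_merges_alt tokens num_merges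
instance (tokens : List String) (num_merges : Int) (out : (List (String × List (String × Int))) × (List (String × String))) : Decidable (Spec_generate_bpe_vocabulary_and_merges tokens num_merges out) := by unfold Spec_generate_bpe_vocabulary_and_merges; infer_instance

-- ===== CLAIM (what is proved, stated in full; the proofs are below) =====
def Claim_equal_generate_bpe_vocabulary_and_merges : Prop := ∀ (tokens : List String) (num_merges : Int), Dom_generate_bpe_vocabulary_and_merges tokens num_merges → Spec_generate_bpe_vocabulary_and_merges tokens num_merges (generate_bpe_vocabulary_and_merges tokens num_merges)


-- ===== LEMMAS AND PROOFS =====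

-- the predicate A's inner scan effectively tests on each vocabulary key
def pvP (t r : String) : Bool := !(r == t) && PySem.Str.endswith t r

-- the list of proper suffixes B's range loop enumerates (as strings)
def pvSL (t : String) : List String :=
  (PySem.List.pyRange 1 (PySem.Str.len t + 1) 1).map (fun i => PySem.Str.slice t (some i) none)

-- the order dict B builds, as a function of the key list
def pvOrderOf (ks : List String) : PySem.Dict String Int :=
  (PySem.List.enumerate ks 0).foldl (fun (d : PySem.Dict String Int) q => d.insert q.2 q.1) PySem.Dict.empty

-- B's per-candidate step, as a named function of the order dict
def pvBStep (order : PySem.Dict String Int) (best : Option (Int × String)) (s : String) : Option (Int × String) :=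
  match PySem.Dict.get? order s with
  | none => best
  | some j => match best with
    | none => some (j, s)
    | some b => if j < b.1 then some (j, s) else best

lemma pvOrder_items (ks : List String) (h : ks.Nodup) :
    (pvOrderOf ks).items = (PySem.List.enumerate ks 0).map (fun q => (q.2, q.1)) := by
  unfold pvOrderOf
  have hfresh : ∀ a ∈ PySem.List.enumerate ks 0, (PySem.Dict.empty : PySem.Dict String Int).contains a.2 = false :=
    fun a _ => PySem.Dict.contains_empty _
  have hnd : ((PySem.List.enumerate ks 0).map (fun q => q.2)).Nodup := by
    rw [PySem.List.map_snd_enumerate]; exact h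
  have := PySem.Dict.items_foldl_insert_fresh (PySem.List.enumerate ks 0)
    (fun q => q.2) (fun q => q.1) PySem.Dict.empty hfresh hnd
  simpa using this

lemma pvOrder_keys (ks : List String) (h : ks.Nodup) : (pvOrderOf ks).keys = ks := by
  have := pvOrder_items ks h
  simp only [PySem.Dict.keys, this, List.map_map]
  exact PySem.List.map_snd_enumerate ks 0

lemma pvOrder_get?_of_mem (ks : List String) (h : ks.Nodup) (s : String) (hs : s ∈ ks) :
    (pvOrderOf ks).get? s = some (ks.idxOf s : Int) := by
  have hk : ks.idxOf s < ks.length := List.idxOf_lt_length_of_mem hs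
  have hnd : (pvOrderOf ks).keys.Nodup := by rw [pvOrder_keys ks h]; exact h
  have : ((ks.idxOf s : Int), ks[ks.idxOf s]) ∈ PySem.List.enumerate ks 0 := by
    rw [PySem.List.mem_enumerate_iff]
    exact ⟨ks.idxOf s, hk, by simp⟩
  have hmem := List.mem_map_of_mem (f := fun q => (q.2, q.1)) this
  rw [← pvOrder_items ks h] at hmem
  simp only [List.getElem_idxOf hk] at hmem
  exact PySem.Dict.get?_of_mem_items _ hmem hnd

lemma pvOrder_get?_of_not_mem (ks : List String) (h : ks.Nodup) (s : String) (hs : s ∉ ks) :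
    (pvOrderOf ks).get? s = none := by
  rw [PySem.Dict.get?_eq_none_iff_not_mem_keys, pvOrder_keys ks h]
  exact hs

lemma pvScan_grows (t : String) (ks : List String) (cm : List String) :
    ∃ ext, ks.foldl (pvScanStepA t) cm = cm ++ ext := by
  induction ks generalizing cm with
  | nil => exact ⟨[], by simp⟩
  | cons r ks ih =>
    simp only [List.foldl_cons]
    obtain ⟨ext, hext⟩ := ih (pvScanStepA t cm r)
    unfold pvScanStepA at hext ⊢
    split_ifs at hext ⊢ with h1 h2
    · exact ⟨ext, hext⟩
    · exact ⟨r :: ext, by rw [hext]; simp⟩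
    · exact ⟨ext, hext⟩

lemma pvScanStep_single (t r : String) (hp : pvP t r = false) : pvScanStepA t [t] r = [t] := by
  unfold pvScanStepA
  unfold pvP at hp
  by_cases h1 : r == t
  · simp [h1]
  · simp only [h1, Bool.not_false, Bool.true_and, PySem.Str.endswith_eq] at hp
    simp [h1, hp]

lemma pvScanStep_single_pos (t r : String) (hp : pvP t r = true) : pvScanStepA t [t] r = [t, r] := by
  unfold pvScanStepA
  unfold pvP at hp
  simp only [Bool.and_eq_true, Bool.not_eq_true', PySem.Str.endswith_eq] at hp
  simp [hp.1, hp.2]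

lemma pvScan_none (t : String) (ks : List String)
    (h : ks.find? (pvP t) = none) : pvMergeScanA t ks = [t] := by
  unfold pvMergeScanA
  induction ks with
  | nil => rfl
  | cons r ks ih =>
    simp only [List.foldl_cons]
    rcases hp : pvP t r with _ | _
    · rw [List.find?_cons_of_neg (by simp [hp])] at h
      rw [pvScanStep_single t r hp]; exact ih h
    · rw [List.find?_cons_of_pos hp] at h; exact absurd h (by simp)

lemma pvScan_some (t : String) (ks : List String) (r : String)
    (h : ks.find? (pvP t) = some r) : ∃ ext, pvMergeScanA t ks = t :: r :: ext := by
  unfold pvMergeScanA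
  induction ks with
  | nil => simp at h
  | cons r0 ks ih =>
    simp only [List.foldl_cons]
    rcases hp : pvP t r0 with _ | _
    · rw [List.find?_cons_of_neg (by simp [hp])] at h
      rw [pvScanStep_single t r0 hp]
      exact ih h
    · rw [List.find?_cons_of_pos hp] at h
      have hr : r0 = r := by simpa using h
      subst hr
      rw [pvScanStep_single_pos t r0 hp]
      obtain ⟨ext, hext⟩ := pvScan_grows t ks [t, r0]
      exact ⟨ext, by rw [hext]; simp⟩

lemma pvMem_SL_iff (t s : String) : s ∈ pvSL t ↔ pvP t s = true := by
  have hends : PySem.Str.endswith t s = true ↔ s.toList <:+ t.toList := by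
    rw [PySem.Str.endswith_eq]; exact PySem.Chars.endswith_iff _ _
  have hP : pvP t s = true ↔ s ≠ t ∧ s.toList <:+ t.toList := by
    unfold pvP
    simp only [Bool.and_eq_true, Bool.not_eq_true', beq_eq_false_iff_ne, hends]
  rw [hP]
  unfold pvSL
  constructor
  · intro hmem
    rw [List.mem_map] at hmem
    obtain ⟨i, hi, hs⟩ := hmem
    rw [PySem.List.mem_pyRange_one] at hi
    rw [PySem.Str.len_eq] at hi
    have h0 : (0:Int) ≤ i := by omega
    have htl : (PySem.Str.slice t (some i) none).toList = t.toList.drop i.toNat := by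
      simp only [PySem.Str.toList_slice, PySem.Chars.slice_eq_listSlice, PySem.List.slice_from _ h0]
    have h1 : 1 ≤ i.toNat := by omega
    have h2 : i.toNat ≤ t.toList.length := by omega
    constructor
    · intro he
      rw [← hs, ← String.toList_inj, htl] at he
      have := congrArg List.length he
      rw [List.length_drop] at this
      omega
    · rw [← hs, htl]; exact List.drop_suffix _ _
  · rintro ⟨hne, hsuf⟩
    have hle : s.toList.length ≤ t.toList.length := hsuf.length_le
    have hlt : s.toList.length < t.toList.length := by
      rcases Nat.lt_or_ge s.toList.length t.toList.length with h | h
      · exact h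
      · exact absurd (String.toList_inj.mp (hsuf.eq_of_length (by omega))) hne
    rw [List.mem_map]
    refine ⟨((t.toList.length - s.toList.length : Nat) : Int), ?_, ?_⟩
    · rw [PySem.List.mem_pyRange_one, PySem.Str.len_eq]
      omega
    · rw [← String.toList_inj]
      have h0 : (0:Int) ≤ ((t.toList.length - s.toList.length : Nat) : Int) := by positivity
      simp only [PySem.Str.toList_slice, PySem.Chars.slice_eq_listSlice, PySem.List.slice_from _ h0, Int.toNat_natCast]
      exact (List.suffix_iff_eq_drop.mp hsuf).symm

lemma pvBestSuffix_eq_fold (order : PySem.Dict String Int) (t : String) :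
    pvBestSuffix order t = (pvSL t).foldl (pvBStep order) none := by
  unfold pvBestSuffix pvSL
  rw [List.foldl_map]
  rfl

lemma pvBStep_of_get?_none (order : PySem.Dict String Int) (s : String)
    (acc : Option (Int × String)) (hj : order.get? s = none) : pvBStep order acc s = acc := by
  unfold pvBStep
  rw [hj]

lemma pvBStep_of_get?_some (order : PySem.Dict String Int) (s : String)
    (acc : Option (Int × String)) (j : Int) (hj : order.get? s = some j) :
    pvBStep order acc s = match acc with
      | none => some (j, s)
      | some b => if j < b.1 then some (j, s) else some b := by
  unfold pvBStep
  rw [hj]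
  cases acc <;> rfl

lemma pvBFold_char (ks : List String) (h : ks.Nodup) (L : List String) :
    ∀ (acc : Option (Int × String)),
    (∀ p, acc = some p → p.2 ∈ ks ∧ p.1 = (ks.idxOf p.2 : Int)) →
    ((L.foldl (pvBStep (pvOrderOf ks)) acc = none ↔ acc = none ∧ ∀ s ∈ L, s ∉ ks) ∧
     ∀ p, L.foldl (pvBStep (pvOrderOf ks)) acc = some p →
       (p.2 ∈ ks ∧ p.1 = (ks.idxOf p.2 : Int)) ∧ (acc = some p ∨ p.2 ∈ L) ∧
       (∀ s ∈ L, s ∈ ks → p.1 ≤ (ks.idxOf s : Int)) ∧ (∀ q, acc = some q → p.1 ≤ q.1)) := by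
  induction L with
  | nil =>
    intro acc hacc
    refine ⟨by simp, ?_⟩
    intro p hp
    simp only [List.foldl_nil] at hp
    refine ⟨hacc p hp, Or.inl hp, by simp, ?_⟩
    intro q hq
    rw [hp] at hq
    cases hq
    exact le_refl _
  | cons s0 L ih =>
    intro acc hacc
    simp only [List.foldl_cons]
    by_cases hs0 : s0 ∈ ks
    · have hget := pvOrder_get?_of_mem ks h s0 hs0
      have hmain : pvBStep (pvOrderOf ks) acc s0 = some ((ks.idxOf s0 : Int), s0) ∨
          pvBStep (pvOrderOf ks) acc s0 = acc := by
        rw [pvBStep_of_get?_some _ _ _ _ hget]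
        cases acc with
        | none => exact Or.inl rfl
        | some b =>
          by_cases hlt : (ks.idxOf s0 : Int) < b.1
          · simp [hlt]
          · simp [hlt]
      rcases hmain with hstep | hstep
      · -- the candidate replaces (or initialises) the accumulator
        have hle : ∀ q, acc = some q → (ks.idxOf s0 : Int) ≤ q.1 := by
          intro q hq
          rw [pvBStep_of_get?_some _ _ _ _ hget, hq] at hstep
          by_cases hlt : (ks.idxOf s0 : Int) < q.1
          · exact le_of_lt hlt
          · simp only [if_neg hlt] at hstep
            simp [Option.some_inj.mp hstep]
        have hacc' : ∀ p, (some ((ks.idxOf s0 : Int), s0) : Option (Int × String)) = some p →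
            p.2 ∈ ks ∧ p.1 = (ks.idxOf p.2 : Int) := by
          rintro p hp
          cases hp
          exact ⟨hs0, rfl⟩
        rw [hstep]
        obtain ⟨ihn, ihs⟩ := ih (some ((ks.idxOf s0 : Int), s0)) hacc'
        constructor
        · constructor
          · intro hx
            exact absurd (ihn.mp hx).1 (by simp)
          · rintro ⟨_, hall⟩
            exact absurd hs0 (hall s0 List.mem_cons_self)
        · intro p hp
          obtain ⟨h1, h2, h3, h4⟩ := ihs p hp
          refine ⟨h1, ?_, ?_, ?_⟩
          · rcases h2 with h2 | h2
            · cases h2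
              exact Or.inr List.mem_cons_self
            · exact Or.inr (List.mem_cons_of_mem _ h2)
          · intro s hs hsk
            rcases List.mem_cons.mp hs with rfl | hs
            · exact h4 _ rfl
            · exact h3 s hs hsk
          · intro q hq
            exact le_trans (h4 _ rfl) (hle q hq)
      · -- the accumulator already holds a smaller index
        have hb : ∃ b, acc = some b ∧ ¬ ((ks.idxOf s0 : Int) < b.1) := by
          cases hacc0 : acc with
          | none =>
            rw [pvBStep_of_get?_some _ _ _ _ hget, hacc0] at hstep
            cases hstep
          | some b =>
            by_cases hlt : (ks.idxOf s0 : Int) < b.1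
            · rw [pvBStep_of_get?_some _ _ _ _ hget, hacc0] at hstep
              simp only [if_pos hlt] at hstep
              have hbe : b = ((ks.idxOf s0 : Int), s0) := (Option.some_inj.mp hstep).symm
              exact ⟨b, rfl, by rw [hbe]; simp⟩
            · exact ⟨b, rfl, hlt⟩
        obtain ⟨b, hbacc, hble⟩ := hb
        rw [hstep]
        obtain ⟨ihn, ihs⟩ := ih acc hacc
        constructor
        · constructor
          · intro hx
            rw [(ihn.mp hx).1] at hbacc
            cases hbacc
          · rintro ⟨_, hall⟩
            exact absurd hs0 (hall s0 List.mem_cons_self)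
        · intro p hp
          obtain ⟨h1, h2, h3, h4⟩ := ihs p hp
          refine ⟨h1, ?_, ?_, h4⟩
          · rcases h2 with h2 | h2
            · exact Or.inl h2
            · exact Or.inr (List.mem_cons_of_mem _ h2)
          · intro s hs hsk
            rcases List.mem_cons.mp hs with rfl | hs
            · exact le_trans (h4 b hbacc) (by omega)
            · exact h3 s hs hsk
    · have hget := pvOrder_get?_of_not_mem ks h s0 hs0
      rw [pvBStep_of_get?_none _ _ _ hget]
      obtain ⟨ihn, ihs⟩ := ih acc hacc
      constructor
      · rw [ihn]
        constructor
        · rintro ⟨h1, h2⟩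
          refine ⟨h1, ?_⟩
          intro s hs
          rcases List.mem_cons.mp hs with rfl | hs
          · exact hs0
          · exact h2 s hs
        · rintro ⟨h1, h2⟩
          exact ⟨h1, fun s hs => h2 s (List.mem_cons_of_mem _ hs)⟩
      · intro p hp
        obtain ⟨h1, h2, h3, h4⟩ := ihs p hp
        refine ⟨h1, ?_, ?_, h4⟩
        · rcases h2 with h2 | h2
          · exact Or.inl h2
          · exact Or.inr (List.mem_cons_of_mem _ h2)
        · intro s hs hsk
          rcases List.mem_cons.mp hs with rfl | hs
          · exact absurd hsk hs0
          · exact h3 s hs hsk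

lemma pvBestSuffix_eq_find (ks : List String) (h : ks.Nodup) (t : String) :
    pvBestSuffix (pvOrderOf ks) t = (ks.find? (pvP t)).map (fun r => ((ks.idxOf r : Int), r)) := by
  rw [pvBestSuffix_eq_fold]
  obtain ⟨hnone, hsome⟩ := pvBFold_char ks h (pvSL t) none (by rintro p ⟨⟩)
  cases hf : ks.find? (pvP t) with
  | none =>
    have hall : ∀ s ∈ pvSL t, s ∉ ks := by
      intro s hs hsk
      exact (List.find?_eq_none.mp hf s hsk) ((pvMem_SL_iff t s).mp hs)
    simp only [Option.map_none]
    exact hnone.mpr ⟨rfl, hall⟩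
  | some r =>
    obtain ⟨hPr, i, hi, hri, hmin⟩ := List.find?_eq_some_iff_getElem.mp hf
    have hrSL : r ∈ pvSL t := (pvMem_SL_iff t r).mpr hPr
    have hrks : r ∈ ks := hri ▸ List.getElem_mem hi
    cases hres : (pvSL t).foldl (pvBStep (pvOrderOf ks)) none with
    | none =>
      obtain ⟨-, hall⟩ := hnone.mp hres
      exact absurd hrks (hall r hrSL)
    | some p =>
      obtain ⟨⟨hpk, hpj⟩, hpmem, hpmin, -⟩ := hsome p hres
      have hpSL : p.2 ∈ pvSL t := by
        rcases hpmem with h' | h'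
        · cases h'
        · exact h'
      have hidxr : List.idxOf r ks = i := by rw [← hri]; exact h.idxOf_getElem i hi
      have hm : List.idxOf p.2 ks < ks.length := List.idxOf_lt_length_of_mem hpk
      have hPp : pvP t p.2 = true := (pvMem_SL_iff t p.2).mp hpSL
      have hile : i ≤ List.idxOf p.2 ks := by
        by_contra hc
        push Not at hc
        have hfail := hmin (List.idxOf p.2 ks) hc
        rw [List.getElem_idxOf hm] at hfail
        simp [hPp] at hfail
      have hle2 : p.1 ≤ (List.idxOf r ks : Int) := hpmin r hrSL hrks
      have hpj' : List.idxOf p.2 ks = i := by omega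
      have hps : p.2 = r := by
        have h1 := List.getElem_idxOf hm
        simp only [hpj'] at h1
        exact h1.symm.trans hri
      have hpjr : p.1 = (List.idxOf r ks : Int) := by rw [hpj, hps]
      simp only [Option.map_some]
      rw [show p = ((List.idxOf r ks : Int), r) from Prod.ext_iff.mpr ⟨hpjr, hps⟩]

lemma pvLoops_eq (tc : PySem.Dict String Int) (num_merges : Int)
    (h : tc.keys.Nodup) :
    ∀ (l : List (String × Int)) (merges : List (String × String)) (mi : Int),
    mi = (merges.length : Int) →
    pvMergeLoopA tc num_merges l mi merges = pvMergeLoopB (pvOrderOf tc.keys) num_merges l merges := by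
  intro l
  induction l with
  | nil => intro merges mi hmi; rfl
  | cons p rest ih =>
    intro merges mi hmi
    obtain ⟨t, c⟩ := p
    simp only [pvMergeLoopA, pvMergeLoopB]
    by_cases hc : c == 1
    · simp only [hc, if_pos]
      exact ih merges mi hmi
    · simp only [hc, Bool.false_eq_true, if_false]
      rw [pvBestSuffix_eq_find tc.keys h t]
      cases hf : tc.keys.find? (pvP t) with
      | none =>
        rw [pvScan_none t tc.keys hf]
        simp only [List.length_singleton, Option.map_none]
        norm_num
        exact ih merges mi hmi
      | some r =>
        obtain ⟨ext, hcm⟩ := pvScan_some t tc.keys r hf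
        rw [hcm]
        have hlen : (t :: r :: ext).length > 1 := by simp
        have hg0 : PySem.List.pyGetD (t :: r :: ext) 0 "" = t := PySem.List.pyGetD_zero_cons _ _ _
        have hg1 : PySem.List.pyGetD (t :: r :: ext) 1 "" = r := by
          have := PySem.List.pyGetD_ofNat (t :: r :: ext) 1 "" (by simp)
          simpa using this
        simp only [hlen, if_pos, hg0, hg1, Option.map_some]
        have hcond : (mi + 1 ≥ num_merges) ↔ (((merges ++ [(t, r)]).length : Int) ≥ num_merges) := by
          simp [hmi]
          try omega
        by_cases hbr : mi + 1 ≥ num_merges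
        · rw [if_pos hbr, if_pos (hcond.mp hbr)]
        · rw [if_neg hbr, if_neg (fun hx => hbr (hcond.mpr hx))]
          exact ih (merges ++ [(t, r)]) (mi + 1) (by simp [hmi]; try omega)

lemma pvVocabA_items (l : List (String × Int)) :
    ∀ (d : PySem.Dict String (List (String × Int))) (n : Int),
    (l.map (fun p => p.1)).Nodup → (∀ p ∈ l, p.1 ∉ d.keys) → d.keys.Nodup →
    ((l.foldl (fun (st : PySem.Dict String (List (String × Int)) × Int) p =>
        if st.1.contains p.1 then st
        else (st.1.insert p.1 [("count", p.2), ("idx", st.2)], st.2 + 1)) (d, n)).1).items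
      = d.items ++ (PySem.List.enumerate l n).map (fun q => (q.2.1, [("count", q.2.2), ("idx", q.1)])) := by
  induction l with
  | nil => intro d n _ _ _; simp [PySem.List.enumerate_nil]
  | cons p rest ih =>
    intro d n hnd hfresh hdk
    simp only [List.foldl_cons]
    have hpc : d.contains p.1 = false := by
      cases hb : d.contains p.1 with
      | false => rfl
      | true => exact absurd ((PySem.Dict.contains_iff_mem_keys d p.1).mp hb) (hfresh p List.mem_cons_self)
    rw [if_neg (by simp [hpc])]
    have hnd' : (rest.map (fun p => p.1)).Nodup := by
      simp only [List.map_cons, List.nodup_cons] at hnd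
      exact hnd.2
    have hfst : p.1 ∉ rest.map (fun p => p.1) := by
      simp only [List.map_cons, List.nodup_cons] at hnd
      exact hnd.1
    have hfresh' : ∀ q ∈ rest, q.1 ∉ (d.insert p.1 [("count", p.2), ("idx", n)]).keys := by
      intro q hq hmem
      rcases (PySem.Dict.mem_keys_insert _ _ _ _).mp hmem with he | hmem'
      · exact hfst (he ▸ List.mem_map_of_mem hq)
      · exact hfresh q (List.mem_cons_of_mem _ hq) hmem'
    rw [ih (d.insert p.1 [("count", p.2), ("idx", n)]) (n + 1) hnd' hfresh'
        (PySem.Dict.nodup_keys_insert _ _ _ hdk)]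
    rw [PySem.Dict.items_insert_of_not_contains d _ hpc]
    simp [PySem.List.enumerate_cons]

lemma pvVocab_eq (tokens : List String) :
    (PySem.List.enumerate (PySem.Dict.counter tokens).items 0).map
        (fun q => (q.2.1, [("count", q.2.2), ("idx", q.1)]))
      = (PySem.Dict.counter tokens).items.map
        (fun p => (p.1, [("count", p.2), ("idx", (pvOrderOf (PySem.Dict.counter tokens).keys).getD p.1 0)])) := by
  have hnd : (PySem.Set.ofList tokens : List String).Nodup := PySem.Set.nodup_ofList tokens
  rw [show pvOrderOf (PySem.Dict.counter tokens).keys = pvOrderOf (PySem.Set.ofList tokens) from by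
    rw [PySem.Dict.keys_counter]]
  rw [PySem.Dict.items_counter]
  apply List.ext_getElem
  · simp [PySem.List.length_enumerate]
  · intro k h1 h2
    have hkk : k < (PySem.Set.ofList tokens : List String).length := by
      simpa [PySem.List.length_enumerate] using h1
    rw [List.getElem_map, List.getElem_map, PySem.List.getElem_enumerate, List.getElem_map]
    have hgd : (pvOrderOf (PySem.Set.ofList tokens)).getD
        ((PySem.Set.ofList tokens : List String)[k]'hkk) 0 = (k : Int) := by
      rw [PySem.Dict.getD_eq_get?_getD,
        pvOrder_get?_of_mem _ hnd _ (List.getElem_mem hkk),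
        hnd.idxOf_getElem k hkk]
      rfl
    simp [hgd]

-- ===== VERDICT (by name: the statement is the Claim_ definition above) =====
theorem generate_bpe_vocabulary_and_merges_spec : Claim_equal_generate_bpe_vocabulary_and_merges := by
  intro tokens num_merges _
  unfold Spec_generate_bpe_vocabulary_and_merges
  unfold generate_bpe_vocabulary_and_merges generate_bpe_vocabulary_and_merges_alt
  rw [PySem.Dict.foldl_insert_getD_add_one_eq_counter]
  have hnd := PySem.Dict.nodup_keys_counter (κ := String) tokens
  have hknd : ((PySem.Dict.counter tokens).items.map (fun p => p.1)).Nodup := hnd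
  refine Prod.ext ?_ ?_
  · -- vocabulary component
    show ((PySem.Dict.counter tokens).items.foldl _ (PySem.Dict.empty, 0)).1.items = _
    rw [pvVocabA_items _ PySem.Dict.empty 0 hknd (by simp [PySem.Dict.keys_empty]) (by simp [PySem.Dict.keys_empty])]
    simpa using pvVocab_eq tokens
  · -- merges component
    exact pvLoops_eq (PySem.Dict.counter tokens) num_merges hnd _ [] 0 rfl
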